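-- pv_equiv track=rewrite | github.com/JunYoungkKwon/Algorithm | programmers/low_level_trainning.py | solution
-- ===== SOURCE A (Python) =====
-- def solution(str_list):
--     answer = []
--     for i, n in enumerate(str_list):
--         if n == "l":
--             return str_list[:i]
--         elif n == "r":
--             return str_list[i+1:]
--     return answer
-- ===== SOURCE B (Python) =====
-- def solution(str_list):
--     n = len(str_list)
--     li = next((i for i, s in enumerate(str_list) if s == "l"), n)
--     ri = next((i for i, s in enumerate(str_list) if s == "r"), n)
--     if li < ri:
--         return str_list[:li]
--     if ri < li:
--         return str_list[ri + 1:]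
--     return []
-- ===== Notes on version B (the rewrite author's own statement) =====
-- stated objective: alternative
-- what changed: Replaces A's single fused early-returning enumerate loop with two first-occurrence index computations (with len as absent-sentinel) followed by a separate comparison branch that slices.
import Mathlib
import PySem

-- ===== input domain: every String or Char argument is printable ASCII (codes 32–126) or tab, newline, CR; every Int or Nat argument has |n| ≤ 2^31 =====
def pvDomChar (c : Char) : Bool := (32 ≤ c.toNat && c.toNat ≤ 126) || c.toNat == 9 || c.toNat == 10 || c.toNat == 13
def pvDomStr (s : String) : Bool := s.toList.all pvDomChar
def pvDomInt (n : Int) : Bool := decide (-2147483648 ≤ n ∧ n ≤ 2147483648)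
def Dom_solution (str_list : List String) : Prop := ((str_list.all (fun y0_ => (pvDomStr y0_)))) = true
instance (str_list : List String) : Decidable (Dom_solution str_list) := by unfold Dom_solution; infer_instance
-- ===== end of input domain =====

-- B replaces A's fused early-returning loop by two first-occurrence index computations and a comparison branch; objective: alternative decomposition.

-- ===== PORT A =====
-- the enumerate loop of A: i is the current index, the slices act on the original list
def solutionAux (orig : List String) : Nat → List String → List String
  | _, [] => []
  | i, n :: rest =>
      if n = "l" then orig.take i
      else if n = "r" then orig.drop (i + 1)
      else solutionAux orig (i + 1) rest

def solution (str_list : List String) : List String :=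
  solutionAux str_list 0 str_list

-- ===== PORT B =====
-- first index of c in xs, or xs.length if absent (B's next(..., n) with a generator)
def firstIdx (c : String) : List String → Nat
  | [] => 0
  | x :: xs => if x = c then 0 else firstIdx c xs + 1

def solution_alt (str_list : List String) : List String :=
  let li := firstIdx "l" str_list
  let ri := firstIdx "r" str_list
  if li < ri then str_list.take li
  else if ri < li then str_list.drop (ri + 1)
  else []

-- ===== PRECONDITION & SPEC =====
def Spec_solution (str_list : List String) (out : List String) : Prop := out = solution_alt str_list
instance (str_list : List String) (out : List String) : Decidable (Spec_solution str_list out) := by unfold Spec_solution; infer_instance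

-- ===== CLAIM (what is proved, stated in full; the proofs are below) =====
def Claim_equal_solution : Prop := ∀ (str_list : List String), Dom_solution str_list → Spec_solution str_list (solution str_list)

-- ===== LEMMAS AND PROOFS =====
theorem solutionAux_eq (orig : List String) (xs : List String) (i : Nat) :
    solutionAux orig i xs =
      (if firstIdx "l" xs < firstIdx "r" xs then orig.take (i + firstIdx "l" xs)
       else if firstIdx "r" xs < firstIdx "l" xs then orig.drop (i + firstIdx "r" xs + 1)
       else []) := by
  induction xs generalizing i with
  | nil => simp [solutionAux, firstIdx]
  | cons x xs ih =>
      by_cases hl : x = "l"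
      · have hr : ¬ x = "r" := by simp [hl]
        simp [solutionAux, firstIdx, hl]
      · by_cases hr : x = "r"
        · simp [solutionAux, firstIdx, hr]
        · simp only [solutionAux, firstIdx, hl, hr, if_false, ih]
          have h1 : ¬ ("l" : String) = x := fun h => hl h.symm
          have h2 : ¬ ("r" : String) = x := fun h => hr h.symm
          split_ifs with c1 c2 c3 c4 c5 <;>
            first
            | (congr 1; omega)
            | rfl

-- ===== VERDICT (by name: the statement is the Claim_ definition above) =====
theorem solution_spec : Claim_equal_solution := by
  intro xs _
  unfold Spec_solution solution solution_alt
  rw [solutionAux_eq]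
  simp
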